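-- pv_equiv track=rewrite | github.com/LouisVie61/PyCode | ProblemSolving/LeetCode1726.py | tupleSameProduct
-- ===== SOURCE A (Python) =====
-- from typing import List
--
-- def tupleSameProduct(nums: List[int]) -> int:
--     n = len(nums)
--     nums.sort()
--
--     pairs = {}
--     for i in range(n):
--         for j in range(i + 1, n):
--             product = nums[i] * nums[j]
--             if product not in pairs:
--                 pairs[product] = [(nums[i], nums[j])]
--             else:
--                 pairs[product].append((nums[i], nums[j]))
--
--     cnt = 0
--     for key, value in pairs.items():
--         num_pairs = len(value)
--         if num_pairs >= 2:
--             cnt += (num_pairs * (num_pairs - 1) // 2) * 8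
--             # // 2 because counting 2 times of 1 [pairs + pairs]
--
--     return cnt
-- ===== SOURCE B (Python) =====
-- from typing import List
--
-- def tupleSameProduct(nums: List[int]) -> int:
--     nums.sort()
--     n = len(nums)
--     products = sorted(nums[i] * nums[j] for i in range(n) for j in range(i + 1, n))
--     cnt = 0
--     run = 0
--     prev = None
--     for p in products:
--         if prev == p:
--             run += 1
--         else:
--             cnt += run * (run - 1) // 2 * 8
--             run = 1
--             prev = p
--     cnt += run * (run - 1) // 2 * 8
--     return cnt
-- ===== Notes on version B (the rewrite author's own statement) =====
-- stated objective: alternative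
-- what changed: Replaces the product->pair-list dictionary and the per-bucket count with a flat list of all pairwise products that is sorted and scanned once, adding 8*C(g,2) per run of g equal consecutive products.
import Mathlib
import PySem

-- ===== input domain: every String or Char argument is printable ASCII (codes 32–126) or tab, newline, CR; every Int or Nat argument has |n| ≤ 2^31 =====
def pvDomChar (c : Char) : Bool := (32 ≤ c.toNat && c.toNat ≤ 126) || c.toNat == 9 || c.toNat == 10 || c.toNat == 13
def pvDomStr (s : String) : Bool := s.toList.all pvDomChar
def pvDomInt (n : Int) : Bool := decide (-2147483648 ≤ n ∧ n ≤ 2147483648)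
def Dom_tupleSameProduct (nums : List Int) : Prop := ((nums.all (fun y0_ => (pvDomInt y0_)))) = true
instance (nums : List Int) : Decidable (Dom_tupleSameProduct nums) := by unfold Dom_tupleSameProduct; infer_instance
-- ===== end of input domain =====

-- B replaces A's product->pair-list dictionary with a flat sorted list of pairwise products scanned
-- once over runs of equal values (alternative algorithm, not claimed faster). Both sort nums in place
-- in Python; the equivalence proved is about the return value (the mutation is identical in A and B).


-- ===== PORT A =====
def tupleSameProduct (nums : List Int) : Int :=
  let n : Int := (nums.length : Int)
  let s := PySem.List.sorted nums (fun x => x) false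
  let pairs := (PySem.List.pyRange 0 n 1).foldl (fun d i =>
      (PySem.List.pyRange (i + 1) n 1).foldl (fun d j =>
        let product := PySem.List.pyGetD s i 0 * PySem.List.pyGetD s j 0
        if d.contains product = false then
          d.insert product [(PySem.List.pyGetD s i 0, PySem.List.pyGetD s j 0)]
        else
          d.insert product (d.getD product [] ++ [(PySem.List.pyGetD s i 0, PySem.List.pyGetD s j 0)])) d)
    (PySem.Dict.empty (κ := Int) (ν := List (Int × Int)))
  pairs.items.foldl (fun cnt kv =>
      let numPairs : Int := (kv.2.length : Int)
      if 2 ≤ numPairs then cnt + PySem.Int.floordiv (numPairs * (numPairs - 1)) 2 * 8 else cnt) 0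

-- ===== PORT B =====
def tupleSameProduct_alt (nums : List Int) : Int :=
  let s := PySem.List.sorted nums (fun x => x) false
  let n : Int := (s.length : Int)
  let products := PySem.List.sorted
      ((PySem.List.pyRange 0 n 1).foldl (fun acc i =>
        acc ++ (PySem.List.pyRange (i + 1) n 1).map
          (fun j => PySem.List.pyGetD s i 0 * PySem.List.pyGetD s j 0)) [])
      (fun x => x) false
  let st := products.foldl (fun (st : Int × Int × Option Int) p =>
      if st.2.2 == some p then (st.1, st.2.1 + 1, st.2.2)
      else (st.1 + PySem.Int.floordiv (st.2.1 * (st.2.1 - 1)) 2 * 8, 1, some p))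
    (0, 0, none)
  st.1 + PySem.Int.floordiv (st.2.1 * (st.2.1 - 1)) 2 * 8

-- ===== PRECONDITION & SPEC =====
def Spec_tupleSameProduct (nums : List Int) (out : Int) : Prop := out = tupleSameProduct_alt nums
instance (nums : List Int) (out : Int) : Decidable (Spec_tupleSameProduct nums out) := by unfold Spec_tupleSameProduct; infer_instance

-- ===== CLAIM (what is proved, stated in full; the proofs are below) =====
def Claim_equal_tupleSameProduct : Prop := ∀ (nums : List Int), Dom_tupleSameProduct nums → Spec_tupleSameProduct nums (tupleSameProduct nums)

-- ===== LEMMAS AND PROOFS =====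

/-- the contribution of a group of `run` equal products: run*(run-1)//2*8 -/
def hI (run : Int) : Int := PySem.Int.floordiv (run * (run - 1)) 2 * 8

/-- the products nums[i]*nums[j], i < j, paired with the pair, in A's generation order -/
def prodsOf (s : List Int) : List (Int × (Int × Int)) :=
  (PySem.List.pyRange 0 (s.length : Int) 1).flatMap (fun i =>
    (PySem.List.pyRange (i + 1) (s.length : Int) 1).map (fun j =>
      (PySem.List.pyGetD s i 0 * PySem.List.pyGetD s j 0,
       (PySem.List.pyGetD s i 0, PySem.List.pyGetD s j 0))))

/-- the common value: sum over distinct products of hI(count) -/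
def T (l : List Int) : Int := ((PySem.Set.ofList l).map (fun k => hI (l.count k))).sum

/-- B's scan step (definitionally the port's lambda) -/
def scanStep (st : Int × Int × Option Int) (p : Int) : Int × Int × Option Int :=
  if st.2.2 == some p then (st.1, st.2.1 + 1, st.2.2)
  else (st.1 + hI st.2.1, 1, some p)

/-- B's remaining scan given previous value v and current run length -/
def Frun (v : Int) (run : Int) : List Int → Int
  | [] => hI run
  | p :: t => if p = v then Frun v (run + 1) t else hI run + Frun p 1 t

/-- B's scan of a whole (fresh) list -/
def S : List Int → Int
  | [] => 0
  | p :: t => Frun p 1 t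

lemma hI_zero : hI 0 = 0 := by decide
lemma hI_one : hI 1 = 0 := by decide

lemma Tperm {l l' : List Int} (h : l.Perm l') : T l = T l' := by
  have hs : (PySem.Set.ofList l).Perm (PySem.Set.ofList l') := by
    refine (List.perm_ext_iff_of_nodup (PySem.Set.nodup_ofList l) (PySem.Set.nodup_ofList l')).2 ?_
    intro a
    simp [PySem.Set.mem_ofList _ _, h.mem_iff]
  calc ((PySem.Set.ofList l).map (fun k => hI (l.count k))).sum
      = ((PySem.Set.ofList l).map (fun k => hI (l'.count k))).sum := by
        refine congrArg List.sum (List.map_congr_left ?_)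
        intro k _
        rw [h.count_eq]
    _ = ((PySem.Set.ofList l').map (fun k => hI (l'.count k))).sum :=
        (hs.map _).sum_eq

lemma scan_some (l : List Int) : ∀ (v cnt run : Int),
    (l.foldl scanStep (cnt, run, some v)).1 + hI (l.foldl scanStep (cnt, run, some v)).2.1
      = cnt + Frun v run l := by
  induction l with
  | nil => intro v cnt run; simp [Frun]
  | cons p t ih =>
    intro v cnt run
    by_cases h : p = v
    · subst h
      rw [List.foldl_cons, show scanStep (cnt, run, some p) p = (cnt, run + 1, some p) by
        simp [scanStep]]
      rw [ih p cnt (run + 1)]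
      simp [Frun]
    · rw [List.foldl_cons, show scanStep (cnt, run, some v) p = (cnt + hI run, 1, some p) by
        simp [scanStep, Ne.symm h]]
      rw [ih p (cnt + hI run) 1]
      rw [show Frun v run (p :: t) = hI run + Frun p 1 t by simp [Frun, h], ← add_assoc]

lemma Frun_absorb (t1 : List Int) : ∀ (v run : Int) (t2 : List Int), (∀ x ∈ t1, x = v) →
    Frun v run (t1 ++ t2) = Frun v (run + (t1.length : Int)) t2 := by
  induction t1 with
  | nil => intro v run t2 _; simp
  | cons a t ih =>
    intro v run t2 hall
    have ha : a = v := hall a (by simp)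
    subst ha
    rw [List.cons_append, show Frun a run (a :: (t ++ t2)) = Frun a (run + 1) (t ++ t2) by
      simp [Frun]]
    rw [ih a (run + 1) t2 (fun x hx => hall x (by simp [hx]))]
    congr 1
    simp only [List.length_cons]
    push_cast
    omega

lemma dropWhile_ne (p : Int) : ∀ (t : List Int), (∀ x ∈ t, p ≤ x) → t.Pairwise (· ≤ ·) →
    ∀ x ∈ t.dropWhile (fun x => x == p), x ≠ p := by
  intro t
  induction t with
  | nil => intro _ _ x hx; simp at hx
  | cons a r ih =>
    intro hle hp x hx
    by_cases ha : a = p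
    · subst ha
      rw [List.dropWhile_cons_of_pos (by simp)] at hx
      exact ih (fun y hy => hle y (by simp [hy])) (List.pairwise_cons.1 hp).2 x hx
    · rw [List.dropWhile_cons_of_neg (by simpa using ha)] at hx
      have hpa : p < a := lt_of_le_of_ne (hle a (by simp)) (Ne.symm ha)
      rcases List.mem_cons.1 hx with rfl | hxr
      · exact ha
      · have hax : a ≤ x := (List.pairwise_cons.1 hp).1 x hxr
        exact fun hxe => absurd (hxe ▸ hax) (not_le.2 hpa)

lemma foldl_add_mem : ∀ (u s : List Int), (∀ x ∈ u, x ∈ s) → u.foldl PySem.Set.add s = s := by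
  intro u
  induction u with
  | nil => intro s _; rfl
  | cons a r ih =>
    intro s hmem
    have hc : a ∈ s := hmem a (by simp)
    rw [List.foldl_cons, show PySem.Set.add s a = s by simp [PySem.Set.add, hc]]
    exact ih s (fun x hx => hmem x (by simp [hx]))

lemma foldl_add_cons_ne (p : Int) : ∀ (u s : List Int), (∀ x ∈ u, x ≠ p) →
    u.foldl PySem.Set.add (p :: s) = p :: u.foldl PySem.Set.add s := by
  intro u
  induction u with
  | nil => intro s _; rfl
  | cons a r ih =>
    intro s hne
    have hap : a ≠ p := hne a (by simp)
    rw [List.foldl_cons, List.foldl_cons, show PySem.Set.add (p :: s) a = p :: PySem.Set.add s a by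
      simp only [PySem.Set.add, PySem.Set.contains_eq_listContains]
      simp only [List.contains_cons, show (a == p) = false by simpa using hap, Bool.false_or]
      split <;> rfl]
    exact ih _ (fun x hx => hne x (by simp [hx]))

lemma S_eq_T : ∀ (n : Nat) (l : List Int), l.length ≤ n → l.Pairwise (· ≤ ·) → S l = T l := by
  intro n
  induction n with
  | zero =>
    intro l hl _
    have : l = [] := List.eq_nil_of_length_eq_zero (Nat.le_zero.1 hl)
    subst this
    simp [S, T, PySem.Set.ofList]
  | succ n ih =>
    intro l hl hsorted
    match l with
    | [] => simp [S, T, PySem.Set.ofList]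
    | p :: t =>
      have hpt : ∀ x ∈ t, p ≤ x := fun x hx => (List.pairwise_cons.1 hsorted).1 x hx
      have ht : t.Pairwise (· ≤ ·) := (List.pairwise_cons.1 hsorted).2
      obtain ⟨t1, t2, hsplit, ht1all, ht2ne, ht2sorted⟩ :
          ∃ t1 t2, t1 ++ t2 = t ∧ (∀ x ∈ t1, x = p) ∧ (∀ x ∈ t2, x ≠ p) ∧
            t2.Pairwise (· ≤ ·) := by
        refine ⟨t.takeWhile (fun x => x == p), t.dropWhile (fun x => x == p),
          List.takeWhile_append_dropWhile, ?_, dropWhile_ne p t hpt ht,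
          ht.sublist (List.dropWhile_sublist _)⟩
        intro x hx
        simpa using List.mem_takeWhile_imp hx
      have hcount : (p :: t).count p = 1 + t1.length := by
        rw [← hsplit]
        rw [show p :: (t1 ++ t2) = (p :: t1) ++ t2 by rfl, List.count_append]
        rw [List.count_eq_length.2 (by intro x hx; rcases List.mem_cons.1 hx with rfl | hx'
                                       · rfl
                                       · exact (ht1all x hx').symm)]
        rw [List.count_eq_zero.2 (fun hx => ht2ne p hx rfl)]
        simp [Nat.add_comm]
      have hcount2 : ∀ k ∈ t2, (p :: t).count k = t2.count k := by
        intro k hk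
        have hkp : k ≠ p := ht2ne k hk
        rw [← hsplit]
        rw [show p :: (t1 ++ t2) = (p :: t1) ++ t2 by rfl, List.count_append]
        rw [List.count_eq_zero.2 (by
          intro hx
          rcases List.mem_cons.1 hx with rfl | hx'
          · exact hkp rfl
          · exact hkp (ht1all k hx'))]
        simp
      have hset : PySem.Set.ofList (p :: t) = p :: PySem.Set.ofList t2 := by
        rw [← hsplit, PySem.Set.ofList_eq_foldl, PySem.Set.ofList_eq_foldl]
        rw [List.foldl_cons, show PySem.Set.add ([] : List Int) p = [p] from rfl, List.foldl_append]
        rw [foldl_add_mem t1 [p] (fun x hx => by simp [ht1all x hx])]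
        exact foldl_add_cons_ne p t2 [] ht2ne
      have hS : S (p :: t) = hI (1 + (t1.length : Int)) + S t2 := by
        show Frun p 1 t = _
        rw [← hsplit, Frun_absorb t1 p 1 t2 ht1all]
        cases t2 with
        | nil => simp [Frun, S]
        | cons q r =>
          have hqp : q ≠ p := ht2ne q (by simp)
          simp [Frun, S, hqp]
      have ht2len : t2.length ≤ n := by
        have h1 : t1.length + t2.length = t.length := by rw [← hsplit]; simp
        have h2 : t.length + 1 ≤ n + 1 := by simpa using hl
        omega
      rw [hS, ih t2 ht2len ht2sorted]
      unfold T
      rw [hset]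
      simp only [List.map_cons, List.sum_cons, hcount]
      have hc2 : ((1 + t1.length : Nat) : Int) = 1 + (t1.length : Int) := by omega
      rw [hc2]
      congr 1
      refine congrArg List.sum (List.map_congr_left ?_)
      intro k hk
      rw [hcount2 k ((PySem.Set.mem_ofList _ _).1 hk)]

-- ===== A-side =====

/-- one insertion step of A's dictionary loop -/
def dstep (d : PySem.Dict Int (List (Int × Int))) (x : Int × (Int × Int)) :
    PySem.Dict Int (List (Int × Int)) :=
  if d.contains x.1 = false then d.insert x.1 [x.2]
  else d.insert x.1 (d.getD x.1 [] ++ [x.2])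

lemma dstep_eq_modify (d : PySem.Dict Int (List (Int × Int))) (x : Int × (Int × Int)) :
    dstep d x = d.modify x.1 [] (· ++ [x.2]) := by
  unfold dstep
  by_cases h : d.contains x.1
  · simp [h, PySem.Dict.modify, PySem.Dict.insert]
  · have h0 : d.getD x.1 [] = [] := PySem.Dict.getD_of_not_contains d [] (by simp [h])
    simp [h, PySem.Dict.modify, PySem.Dict.insert, h0]

lemma ite_hI (m : Nat) : (if 2 ≤ (m : Int) then hI (m : Int) else 0) = hI (m : Int) := by
  split
  · rfl
  · have hm : m = 0 ∨ m = 1 := by omega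
    rcases hm with rfl | rfl
    · exact hI_zero.symm
    · exact hI_one.symm

lemma dict_sum (L : List (Int × (Int × Int))) :
    ((L.foldl dstep PySem.Dict.empty).items).foldl
      (fun cnt kv => if 2 ≤ ((kv.2.length : Int)) then
        cnt + PySem.Int.floordiv ((kv.2.length : Int) * ((kv.2.length : Int) - 1)) 2 * 8
      else cnt) 0
    = T (L.map (·.1)) := by
  have hd : L.foldl dstep PySem.Dict.empty
      = L.foldl (fun d x => d.modify x.1 [] (· ++ [x.2])) PySem.Dict.empty :=
    PySem.List.foldl_congr_mem L _ _ _ (fun d x _ => dstep_eq_modify d x)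
  rw [hd]
  have hnd : (L.foldl (fun d x => d.modify x.1 [] (· ++ [x.2])) PySem.Dict.empty).keys.Nodup :=
    PySem.Dict.nodup_keys_foldl_modify_key L (·.1) [] (fun _ x => (· ++ [x.2])) PySem.Dict.empty
      PySem.Dict.nodup_keys_empty
  have hkeys : (L.foldl (fun d x => d.modify x.1 [] (· ++ [x.2])) PySem.Dict.empty).keys
      = PySem.Set.ofList (L.map (·.1)) := by
    rw [PySem.Dict.keys_foldl_modify_key L (·.1) [] (fun _ x => (· ++ [x.2])) PySem.Dict.empty]
    rfl
  rw [PySem.Dict.items_eq_map_keys _ hnd [], hkeys, List.foldl_map]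
  have hlen : ∀ k, (((L.foldl (fun d x => d.modify x.1 [] (· ++ [x.2]))
      PySem.Dict.empty).getD k []).length) = (L.map (·.1)).count k := by
    intro k
    rw [PySem.Dict.getD_foldl_modify_append L PySem.Dict.empty k, PySem.Dict.getD_empty]
    simp only [List.nil_append, List.length_map]
    rw [List.count, List.countP_map, List.countP_eq_length_filter]
    rfl
  have hcongr : ∀ (cnt : Int), ∀ k ∈ PySem.Set.ofList (L.map (·.1)),
      (fun cnt k => if 2 ≤ ((((L.foldl (fun d x => d.modify x.1 [] (· ++ [x.2]))
          PySem.Dict.empty).getD k []).length : Int)) then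
        cnt + PySem.Int.floordiv ((((L.foldl (fun d x => d.modify x.1 [] (· ++ [x.2]))
          PySem.Dict.empty).getD k []).length : Int) * ((((L.foldl (fun d x => d.modify x.1 [] (· ++ [x.2]))
          PySem.Dict.empty).getD k []).length : Int) - 1)) 2 * 8
      else cnt) cnt k = cnt + hI (((L.map (·.1)).count k : Int)) := by
    intro cnt k _
    simp only [hlen k]
    rw [← ite_hI ((L.map (·.1)).count k)]
    show (if 2 ≤ (((L.map (·.1)).count k : Nat) : Int) then
        cnt + hI (((L.map (·.1)).count k : Nat) : Int) else cnt) = _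
    split
    · rfl
    · exact (add_zero cnt).symm
  rw [PySem.List.foldl_congr_mem _ _ _ 0 hcongr]
  rw [PySem.List.foldl_add]
  rw [zero_add]
  rfl

lemma A_eq (nums : List Int) :
    tupleSameProduct nums = T ((prodsOf (PySem.List.sorted nums (fun x => x) false)).map (·.1)) := by
  have hlen : ((PySem.List.sorted nums (fun x => x) false).length : Int) = (nums.length : Int) := by
    rw [PySem.List.length_sorted]
  have hloop : (PySem.List.pyRange 0 (nums.length : Int) 1).foldl (fun d i =>
      (PySem.List.pyRange (i + 1) (nums.length : Int) 1).foldl (fun d j =>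
        let product := PySem.List.pyGetD (PySem.List.sorted nums (fun x => x) false) i 0 *
          PySem.List.pyGetD (PySem.List.sorted nums (fun x => x) false) j 0
        if d.contains product = false then
          d.insert product [(PySem.List.pyGetD (PySem.List.sorted nums (fun x => x) false) i 0,
            PySem.List.pyGetD (PySem.List.sorted nums (fun x => x) false) j 0)]
        else
          d.insert product (d.getD product [] ++
            [(PySem.List.pyGetD (PySem.List.sorted nums (fun x => x) false) i 0,
              PySem.List.pyGetD (PySem.List.sorted nums (fun x => x) false) j 0)])) d)
      (PySem.Dict.empty (κ := Int) (ν := List (Int × Int)))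
      = (prodsOf (PySem.List.sorted nums (fun x => x) false)).foldl dstep PySem.Dict.empty := by
    rw [prodsOf, List.foldl_flatMap, hlen]
    refine PySem.List.foldl_congr_mem _ _ _ _ ?_
    intro d i _
    rw [List.foldl_map]
    rfl
  simp only [tupleSameProduct]
  rw [hloop, dict_sum]

-- ===== B-side =====

lemma scan_full (l : List Int) :
    (l.foldl (fun (st : Int × Int × Option Int) p =>
      if st.2.2 == some p then (st.1, st.2.1 + 1, st.2.2)
      else (st.1 + PySem.Int.floordiv (st.2.1 * (st.2.1 - 1)) 2 * 8, 1, some p)) (0, 0, none)).1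
    + PySem.Int.floordiv
        ((l.foldl (fun (st : Int × Int × Option Int) p =>
          if st.2.2 == some p then (st.1, st.2.1 + 1, st.2.2)
          else (st.1 + PySem.Int.floordiv (st.2.1 * (st.2.1 - 1)) 2 * 8, 1, some p)) (0, 0, none)).2.1
        * ((l.foldl (fun (st : Int × Int × Option Int) p =>
          if st.2.2 == some p then (st.1, st.2.1 + 1, st.2.2)
          else (st.1 + PySem.Int.floordiv (st.2.1 * (st.2.1 - 1)) 2 * 8, 1, some p)) (0, 0, none)).2.1
          - 1)) 2 * 8
    = S l := by
  show (l.foldl scanStep (0, 0, none)).1 + hI (l.foldl scanStep (0, 0, none)).2.1 = S l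
  cases l with
  | nil => simp [S, hI_zero]
  | cons p t =>
    rw [List.foldl_cons, show scanStep (0, 0, none) p = (0 + hI 0, 1, some p) by simp [scanStep]]
    rw [scan_some t p (0 + hI 0) 1]
    simp [S, hI_zero]

lemma prodsOf_fst (s : List Int) :
    (prodsOf s).map (·.1) = (PySem.List.pyRange 0 (s.length : Int) 1).flatMap (fun i =>
      (PySem.List.pyRange (i + 1) (s.length : Int) 1).map
        (fun j => PySem.List.pyGetD s i 0 * PySem.List.pyGetD s j 0)) := by
  rw [prodsOf, List.map_flatMap]
  simp only [List.map_map]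
  rfl

lemma B_eq (nums : List Int) :
    tupleSameProduct_alt nums =
      T (PySem.List.sorted ((prodsOf (PySem.List.sorted nums (fun x => x) false)).map (·.1)) (fun x => x) false) := by
  simp only [tupleSameProduct_alt]
  rw [PySem.List.foldl_append_eq_flatMap, List.nil_append, ← prodsOf_fst]
  rw [scan_full]
  refine S_eq_T _ _ le_rfl ?_
  have := PySem.List.sorted_pairwise ((prodsOf (PySem.List.sorted nums (fun x => x) false)).map (·.1)) (fun x => x)
  simpa using this

-- ===== VERDICT (by name: the statement is the Claim_ definition above) =====
theorem tupleSameProduct_spec : Claim_equal_tupleSameProduct := by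
  intro nums _
  unfold Spec_tupleSameProduct
  rw [A_eq, B_eq]
  exact Tperm (PySem.List.sorted_perm _ _ _).symm
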